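-- pv_equiv track=rewrite | github.com/gaofei8704/memory_assistant | utils.py | mix_content
-- ===== SOURCE A (Python) =====
-- def mix_content(review_items, new_items):
--     """混合新旧内容"""
--     mixed = []
--     max_len = max(len(review_items), len(new_items))
--
--     for i in range(max_len):
--         if i < len(review_items):
--             mixed.append(('review', review_items[i]))
--         if i < len(new_items):
--             mixed.append(('new', new_items[i]))
--
--     return mixed
-- ===== SOURCE B (Python) =====
-- def mix_content(review_items, new_items):
--     """混合新旧内容"""
--     keyed = [(2 * i, ('review', x)) for i, x in enumerate(review_items)]
--     keyed += [(2 * i + 1, ('new', x)) for i, x in enumerate(new_items)]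
--     keyed.sort(key=lambda p: p[0])
--     return [pair for _, pair in keyed]
-- ===== Notes on version B (the rewrite author's own statement) =====
-- stated objective: alternative
-- what changed: Replaced A's single index loop with length guards by decorate-sort-undecorate: tag review items with key 2*i and new items with key 2*i+1, concatenate, sort by key, and strip keys; increasing key order is exactly the review-before-new interleaving.
import Mathlib
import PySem

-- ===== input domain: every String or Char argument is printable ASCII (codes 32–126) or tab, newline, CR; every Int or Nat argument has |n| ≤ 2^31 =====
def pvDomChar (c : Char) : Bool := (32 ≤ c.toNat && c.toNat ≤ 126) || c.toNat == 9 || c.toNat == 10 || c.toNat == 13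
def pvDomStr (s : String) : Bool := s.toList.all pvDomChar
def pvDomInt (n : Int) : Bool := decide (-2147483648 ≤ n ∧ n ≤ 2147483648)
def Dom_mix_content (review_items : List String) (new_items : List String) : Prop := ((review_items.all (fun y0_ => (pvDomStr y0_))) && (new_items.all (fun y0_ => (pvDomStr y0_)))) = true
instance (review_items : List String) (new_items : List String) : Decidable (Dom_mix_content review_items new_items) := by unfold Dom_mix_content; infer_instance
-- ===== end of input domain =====

-- B replaces A's guarded index loop by decorate-sort-undecorate (key 2*i for review, 2*i+1
-- for new, sort by key, strip keys); objective: alternative (not faster).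

-- ===== PORT A =====
def mix_content (review_items : List String) (new_items : List String) : List (String × String) :=
  let max_len : Int := max (review_items.length : Int) (new_items.length : Int)
  (PySem.List.pyRange 0 max_len 1).foldl (fun mixed i =>
    let mixed := if i < (review_items.length : Int)
      then mixed ++ [(("review" : String), PySem.List.pyGetD review_items i "")] else mixed
    if i < (new_items.length : Int)
      then mixed ++ [(("new" : String), PySem.List.pyGetD new_items i "")] else mixed) []

-- ===== PORT B =====
def mix_content_alt (review_items : List String) (new_items : List String) : List (String × String) :=
  let keyed := (PySem.List.enumerate review_items 0).map
      (fun p => (2 * p.1, (("review" : String), p.2)))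
  let keyed := keyed ++ (PySem.List.enumerate new_items 0).map
      (fun p => (2 * p.1 + 1, (("new" : String), p.2)))
  (PySem.List.sorted keyed (fun p => p.1) false).map (fun p => p.2)

-- ===== PRECONDITION & SPEC =====
def Spec_mix_content (review_items : List String) (new_items : List String) (out : List (String × String)) : Prop := out = mix_content_alt review_items new_items
instance (review_items : List String) (new_items : List String) (out : List (String × String)) : Decidable (Spec_mix_content review_items new_items out) := by unfold Spec_mix_content; infer_instance

-- ===== CLAIM (what is proved, stated in full; the proofs are below) =====
def Claim_equal_mix_content : Prop := ∀ (review_items : List String) (new_items : List String), Dom_mix_content review_items new_items → Spec_mix_content review_items new_items (mix_content review_items new_items)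

-- ===== LEMMAS AND PROOFS =====

-- one step of A's loop, as a plain list
def pvBody (r n : List String) (k : Nat) : List (String × String) :=
  (if k < r.length then [(("review" : String), r.getD k "")] else []) ++
  (if k < n.length then [(("new" : String), n.getD k "")] else [])

-- one step, with B's sort keys attached
def pvKeyBody (r n : List String) (k : Nat) : List (Int × (String × String)) :=
  (if k < r.length then [((2 * (k : Int)), (("review" : String), r.getD k ""))] else []) ++
  (if k < n.length then [((2 * (k : Int) + 1), (("new" : String), n.getD k ""))] else [])

-- the keyed interleaving B's sort must produce
def pvM (r n : List String) : List (Int × (String × String)) :=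
  (List.range (max r.length n.length)).flatMap (pvKeyBody r n)

theorem pvKeyBody_key_bounds (r n : List String) (k : Nat) (p : Int × (String × String))
    (hp : p ∈ pvKeyBody r n k) : 2 * (k : Int) ≤ p.1 ∧ p.1 < 2 * (k : Int) + 2 := by
  unfold pvKeyBody at hp
  rcases List.mem_append.mp hp with h | h <;> split_ifs at h <;> simp_all

theorem pvM_key_lt (r n : List String) (m : Nat) (p : Int × (String × String))
    (hp : p ∈ (List.range m).flatMap (pvKeyBody r n)) : p.1 < 2 * (m : Int) := by
  rcases List.mem_flatMap.mp hp with ⟨k, hk, hpk⟩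
  have hkm := List.mem_range.mp hk
  have := pvKeyBody_key_bounds r n k p hpk
  omega

theorem pvM_pairwise (r n : List String) (m : Nat) :
    ((List.range m).flatMap (pvKeyBody r n)).Pairwise (fun a b => a.1 < b.1) := by
  induction m with
  | zero => simp
  | succ m ih =>
    rw [List.range_succ, List.flatMap_append]
    refine List.pairwise_append.mpr ⟨ih, ?_, ?_⟩
    · simp only [List.flatMap_cons, List.flatMap_nil, List.append_nil]
      unfold pvKeyBody
      split_ifs <;> simp
    · intro a ha b hb
      have h1 := pvM_key_lt r n m a ha
      simp only [List.flatMap_cons, List.flatMap_nil, List.append_nil] at hb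
      have h2 := (pvKeyBody_key_bounds r n m b hb).1
      omega

theorem pvFlatMap_append_perm {α β : Type} (l : List α) (f g : α → List β) :
    (l.flatMap (fun k => f k ++ g k)).Perm (l.flatMap f ++ l.flatMap g) := by
  induction l with
  | nil => simp
  | cons x xs ih =>
    simp only [List.flatMap_cons]
    refine (ih.append_left (f x ++ g x)).trans ?_
    rw [List.append_assoc, List.append_assoc]
    apply List.Perm.append_left
    rw [← List.append_assoc, ← List.append_assoc]
    exact List.perm_append_comm.append_right _

-- the guarded single-tag flatMap over range(max …) collapses to a map over range(len l)
theorem pvSingle {α : Type} (l : List String) (m : Nat) (hm : l.length ≤ m)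
    (h : Nat → α) :
    (List.range m).flatMap (fun k => if k < l.length then [h k] else [])
      = (List.range l.length).map h := by
  obtain ⟨d, rfl⟩ := Nat.exists_eq_add_of_le hm
  rw [List.range_add, List.flatMap_append, List.flatMap_map]
  have h1 : ∀ t, t ≤ l.length →
      (List.range t).flatMap (fun k => if k < l.length then [h k] else [])
        = (List.range t).map h := by
    intro t ht
    induction t with
    | zero => simp
    | succ t iht =>
      rw [List.range_succ, List.flatMap_append, List.map_append, iht (by omega)]
      simp [Nat.lt_of_lt_of_le (Nat.lt_succ_self t) ht]
  have h2 : (List.range d).flatMap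
      (fun k => if l.length + k < l.length then [h (l.length + k)] else []) = [] := by
    refine List.flatMap_eq_nil_iff.mpr ?_
    intro k _
    rw [if_neg (by omega)]
  rw [h1 l.length le_rfl, h2, List.append_nil]

-- map over enumerate = map over range (generalized start)
theorem pvEnumMap {α : Type} (l : List String) (s : Int) (g : Int → String → α) :
    (PySem.List.enumerate l s).map (fun p => g p.1 p.2)
      = (List.range l.length).map (fun k : Nat => g (s + (k : Int)) (l.getD k "")) := by
  induction l generalizing s with
  | nil => simp [PySem.List.enumerate_nil]
  | cons x xs ih =>
    rw [PySem.List.enumerate_cons, List.map_cons, ih (s + 1)]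
    simp only [List.length_cons, List.range_succ_eq_map, List.map_cons, List.map_map]
    congr 1
    · simp
    · apply List.map_congr_left
      intro k _
      simp only [Function.comp_apply, List.getD_cons_succ]
      congr 1
      push_cast
      ring

theorem pvM_perm (r n : List String) :
    (pvM r n).Perm
      ((PySem.List.enumerate r 0).map (fun p => (2 * p.1, (("review" : String), p.2)))
        ++ (PySem.List.enumerate n 0).map (fun p => (2 * p.1 + 1, (("new" : String), p.2)))) := by
  unfold pvM pvKeyBody
  refine (pvFlatMap_append_perm _ _ _).trans ?_
  rw [pvSingle (α := Int × (String × String)) r (max r.length n.length) (Nat.le_max_left _ _)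
      (fun k => ((2 * (k : Int)), (("review" : String), r.getD k ""))),
      pvSingle (α := Int × (String × String)) n (max r.length n.length) (Nat.le_max_right _ _)
      (fun k => ((2 * (k : Int) + 1), (("new" : String), n.getD k ""))),
      pvEnumMap r 0 (fun i x => ((2 * i : Int), (("review" : String), x))),
      pvEnumMap n 0 (fun i x => ((2 * i + 1 : Int), (("new" : String), x)))]
  simp

theorem pvSorted_eq (r n : List String) :
    PySem.List.sorted
      ((PySem.List.enumerate r 0).map (fun p => (2 * p.1, (("review" : String), p.2)))
        ++ (PySem.List.enumerate n 0).map (fun p => (2 * p.1 + 1, (("new" : String), p.2))))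
      (fun p => p.1) false = pvM r n := by
  apply PySem.List.sorted_eq_of_perm_of_pairwise_lt
  · exact pvM_perm r n
  · exact pvM_pairwise r n _

-- A's foldl equals the flatMap of pvBody (same derivation as the loop-shape lemma)
theorem pvA_eq_flatMap (r n : List String) :
    mix_content r n = (List.range (max r.length n.length)).flatMap (pvBody r n) := by
  unfold mix_content
  have hbody : (fun (mixed : List (String × String)) (i : Int) =>
      let mixed := if i < (r.length : Int)
        then mixed ++ [(("review" : String), PySem.List.pyGetD r i "")] else mixed
      if i < (n.length : Int)
        then mixed ++ [(("new" : String), PySem.List.pyGetD n i "")] else mixed)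
      = (fun mixed i => mixed ++
          ((if i < (r.length : Int) then [(("review" : String), PySem.List.pyGetD r i "")] else []) ++
           (if i < (n.length : Int) then [(("new" : String), PySem.List.pyGetD n i "")] else []))) := by
    funext mixed i
    split_ifs <;> simp
  simp only [hbody, PySem.List.foldl_append_eq_flatMap, List.nil_append]
  rw [PySem.List.pyRange_one]
  have hmax : (max (r.length : Int) (n.length : Int) - 0).toNat = max r.length n.length := by
    omega
  rw [hmax, List.flatMap_map]
  have hfun : (fun k : Nat =>
      (if ((0 : Int) + (k : Int)) < (r.length : Int)
        then [(("review" : String), PySem.List.pyGetD r ((0 : Int) + (k : Int)) "")] else []) ++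
      (if ((0 : Int) + (k : Int)) < (n.length : Int)
        then [(("new" : String), PySem.List.pyGetD n ((0 : Int) + (k : Int)) "")] else []))
      = pvBody r n := by
    funext k
    simp [pvBody, PySem.List.pyGetD_natCast]
  rw [hfun]

theorem pvMix_eq (r n : List String) : mix_content r n = mix_content_alt r n := by
  rw [pvA_eq_flatMap]
  simp only [mix_content_alt]
  rw [pvSorted_eq]
  unfold pvM
  rw [List.map_flatMap]
  have hfun : (fun k : Nat => (pvKeyBody r n k).map (fun p => p.2)) = pvBody r n := by
    funext k
    unfold pvKeyBody pvBody
    split_ifs <;> simp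
  rw [hfun]

-- ===== VERDICT (by name: the statement is the Claim_ definition above) =====
theorem mix_content_spec : Claim_equal_mix_content := by
  intro r n _
  exact pvMix_eq r n
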